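-- pv_equiv track=rewrite | github.com/jchromik/tuk2-exercise1 | task2/cooccurrence_per_code_range.py | prefix_to_range
-- ===== SOURCE A (Python) =====
-- RANGE_STARTS = [
--     1, 140, 240, 280, 290, 320, 390, 460, 520, 580, 630, 680, 710, 740, 760,
--     780, 800]
--
-- def prefix_to_range(icd9prefix):
--     """Converts an ICD9 code prefix to its range number.
--     See RANGE_NAMES for a mapping of range numbers and names.
--     """
--     if "E" in icd9prefix.upper():
--         return 18
--     if "V" in icd9prefix.upper():
--         return 19
--
--     try:
--         numeric_prefix = int(icd9prefix)
--     except ValueError: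
--         return 0
--
--     for i in range(0, len(RANGE_STARTS)):
--         if RANGE_STARTS[i] > numeric_prefix:
--             return i
--
--     return len(RANGE_STARTS)
-- ===== SOURCE B (Python) =====
-- import bisect
--
-- RANGE_STARTS = [
--     1, 140, 240, 280, 290, 320, 390, 460, 520, 580, 630, 680, 710, 740, 760,
--     780, 800]
--
--
-- def prefix_to_range(icd9prefix):
--     """Converts an ICD9 code prefix to its range number (bisect version)."""
--     upper = icd9prefix.upper()
--     if "E" in upper:
--         return 18
--     if "V" in upper:
--         return 19
--
--     try:
--         numeric_prefix = int(icd9prefix)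
--     except ValueError:
--         return 0
--
--     return bisect.bisect_right(RANGE_STARTS, numeric_prefix)
-- ===== Notes on version B (the rewrite author's own statement) =====
-- stated objective: idiomatic
-- what changed: The linear first-index-greater-than scan over RANGE_STARTS (with its len() fall-through) is replaced by a single binary search, bisect.bisect_right(RANGE_STARTS, numeric_prefix); the E/V checks and the int() conversion are unchanged.
import Mathlib
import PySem

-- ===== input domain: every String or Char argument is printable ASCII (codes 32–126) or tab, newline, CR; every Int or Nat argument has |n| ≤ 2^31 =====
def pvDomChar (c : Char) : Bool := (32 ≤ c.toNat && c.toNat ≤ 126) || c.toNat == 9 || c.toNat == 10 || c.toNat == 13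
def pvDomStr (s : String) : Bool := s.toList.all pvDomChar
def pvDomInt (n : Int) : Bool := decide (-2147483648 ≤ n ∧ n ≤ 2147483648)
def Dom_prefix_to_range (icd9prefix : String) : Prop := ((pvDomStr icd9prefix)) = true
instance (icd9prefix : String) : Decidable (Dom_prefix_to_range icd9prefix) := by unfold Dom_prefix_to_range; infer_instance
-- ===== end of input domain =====

-- B replaces A's linear scan over RANGE_STARTS by bisect.bisect_right (idiomatic; table is tiny, no speed claim).


-- ===== PORT A =====
def RANGE_STARTS : List Int := [1, 140, 240, 280, 290, 320, 390, 460, 520, 580, 630, 680, 710, 740, 760, 780, 800]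

-- the 'for i in range(0, len(RANGE_STARTS))' loop with its early return; falls through to len(RANGE_STARTS)
def prefixLoop (n : Int) : List Int → Int
  | [] => (RANGE_STARTS.length : Int)
  | i :: rest =>
    if PySem.List.pyGetD RANGE_STARTS i 0 > n then i else prefixLoop n rest

def prefix_to_range (icd9prefix : String) : Int :=
  if PySem.Str.isIn "E" (PySem.Str.upper icd9prefix) then 18
  else if PySem.Str.isIn "V" (PySem.Str.upper icd9prefix) then 19
  else
    match PySem.Int.ofStr? icd9prefix with
    | none => 0
    | some numeric_prefix =>
      prefixLoop numeric_prefix (PySem.List.pyRange 0 (RANGE_STARTS.length : Int) 1)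

-- ===== PORT B =====
def prefix_to_range_alt (icd9prefix : String) : Int :=
  let upper := PySem.Str.upper icd9prefix
  if PySem.Str.isIn "E" upper then 18
  else if PySem.Str.isIn "V" upper then 19
  else
    match PySem.Int.ofStr? icd9prefix with
    | none => 0
    | some numeric_prefix =>
      (PySem.List.bisectRight RANGE_STARTS numeric_prefix : Int)

-- ===== PRECONDITION & SPEC =====
def Spec_prefix_to_range (icd9prefix : String) (out : Int) : Prop := out = prefix_to_range_alt icd9prefix
instance (icd9prefix : String) (out : Int) : Decidable (Spec_prefix_to_range icd9prefix out) := by unfold Spec_prefix_to_range; infer_instance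

-- ===== CLAIM (what is proved, stated in full; the proofs are below) =====
def Claim_equal_prefix_to_range : Prop := ∀ (icd9prefix : String), Dom_prefix_to_range icd9prefix → Spec_prefix_to_range icd9prefix (prefix_to_range icd9prefix)

-- ===== LEMMAS AND PROOFS =====

-- the linear scan and the binary search agree on every integer (the table is a fixed literal)
set_option maxHeartbeats 2000000 in
theorem prefixLoop_eq_bisect (n : Int) :
    prefixLoop n (PySem.List.pyRange 0 (RANGE_STARTS.length : Int) 1)
      = (PySem.List.bisectRight RANGE_STARTS n : Int) := by
  have hr : PySem.List.pyRange 0 (RANGE_STARTS.length : Int) 1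
      = [0, 1, 2, 3, 4, 5, 6, 7, 8, 9, 10, 11, 12, 13, 14, 15, 16] := by decide
  obtain ⟨hb1, hb2, hb3⟩ :=
    PySem.List.bisectRight_spec RANGE_STARTS n (by decide)
  generalize hbg : PySem.List.bisectRight RANGE_STARTS n = b at hb1 hb2 hb3 ⊢
  have H : ∀ j (hj : j < RANGE_STARTS.length), (j < b) ↔ RANGE_STARTS[j] ≤ n := by
    intro j hj
    constructor
    · exact hb2 j hj
    · intro hle
      by_contra hlt
      exact absurd (hb3 j hj (Nat.le_of_not_lt hlt)) (not_lt.mpr hle)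
  have H0 : (0 < b) ↔ (1 : Int) ≤ n := by simpa [RANGE_STARTS] using H 0 (by decide)
  have H1 : (1 < b) ↔ (140 : Int) ≤ n := by simpa [RANGE_STARTS] using H 1 (by decide)
  have H2 : (2 < b) ↔ (240 : Int) ≤ n := by simpa [RANGE_STARTS] using H 2 (by decide)
  have H3 : (3 < b) ↔ (280 : Int) ≤ n := by simpa [RANGE_STARTS] using H 3 (by decide)
  have H4 : (4 < b) ↔ (290 : Int) ≤ n := by simpa [RANGE_STARTS] using H 4 (by decide)
  have H5 : (5 < b) ↔ (320 : Int) ≤ n := by simpa [RANGE_STARTS] using H 5 (by decide)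
  have H6 : (6 < b) ↔ (390 : Int) ≤ n := by simpa [RANGE_STARTS] using H 6 (by decide)
  have H7 : (7 < b) ↔ (460 : Int) ≤ n := by simpa [RANGE_STARTS] using H 7 (by decide)
  have H8 : (8 < b) ↔ (520 : Int) ≤ n := by simpa [RANGE_STARTS] using H 8 (by decide)
  have H9 : (9 < b) ↔ (580 : Int) ≤ n := by simpa [RANGE_STARTS] using H 9 (by decide)
  have H10 : (10 < b) ↔ (630 : Int) ≤ n := by simpa [RANGE_STARTS] using H 10 (by decide)
  have H11 : (11 < b) ↔ (680 : Int) ≤ n := by simpa [RANGE_STARTS] using H 11 (by decide)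
  have H12 : (12 < b) ↔ (710 : Int) ≤ n := by simpa [RANGE_STARTS] using H 12 (by decide)
  have H13 : (13 < b) ↔ (740 : Int) ≤ n := by simpa [RANGE_STARTS] using H 13 (by decide)
  have H14 : (14 < b) ↔ (760 : Int) ≤ n := by simpa [RANGE_STARTS] using H 14 (by decide)
  have H15 : (15 < b) ↔ (780 : Int) ≤ n := by simpa [RANGE_STARTS] using H 15 (by decide)
  have H16 : (16 < b) ↔ (800 : Int) ≤ n := by simpa [RANGE_STARTS] using H 16 (by decide)
  have hl : prefixLoop n [0, 1, 2, 3, 4, 5, 6, 7, 8, 9, 10, 11, 12, 13, 14, 15, 16]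
      = (if (1 : Int) > n then (0 : Int) else (if (140 : Int) > n then (1 : Int) else (if (240 : Int) > n then (2 : Int) else (if (280 : Int) > n then (3 : Int) else (if (290 : Int) > n then (4 : Int) else (if (320 : Int) > n then (5 : Int) else (if (390 : Int) > n then (6 : Int) else (if (460 : Int) > n then (7 : Int) else (if (520 : Int) > n then (8 : Int) else (if (580 : Int) > n then (9 : Int) else (if (630 : Int) > n then (10 : Int) else (if (680 : Int) > n then (11 : Int) else (if (710 : Int) > n then (12 : Int) else (if (740 : Int) > n then (13 : Int) else (if (760 : Int) > n then (14 : Int) else (if (780 : Int) > n then (15 : Int) else (if (800 : Int) > n then (16 : Int) else 17))))))))))))))))) := rfl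
  have hb17 : b ≤ 17 := by simpa [RANGE_STARTS] using hb1
  clear hb1 hb2 hb3 H hbg
  rw [hr, hl]
  by_cases h0 : (1 : Int) > n
  · rw [if_pos h0]; have u1 := H0.mp; omega
  rw [if_neg h0]
  by_cases h1 : (140 : Int) > n
  · rw [if_pos h1]; have u1 := H1.mp; have u2 := H0.mpr; omega
  rw [if_neg h1]
  by_cases h2 : (240 : Int) > n
  · rw [if_pos h2]; have u1 := H2.mp; have u2 := H1.mpr; omega
  rw [if_neg h2]
  by_cases h3 : (280 : Int) > n
  · rw [if_pos h3]; have u1 := H3.mp; have u2 := H2.mpr; omega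
  rw [if_neg h3]
  by_cases h4 : (290 : Int) > n
  · rw [if_pos h4]; have u1 := H4.mp; have u2 := H3.mpr; omega
  rw [if_neg h4]
  by_cases h5 : (320 : Int) > n
  · rw [if_pos h5]; have u1 := H5.mp; have u2 := H4.mpr; omega
  rw [if_neg h5]
  by_cases h6 : (390 : Int) > n
  · rw [if_pos h6]; have u1 := H6.mp; have u2 := H5.mpr; omega
  rw [if_neg h6]
  by_cases h7 : (460 : Int) > n
  · rw [if_pos h7]; have u1 := H7.mp; have u2 := H6.mpr; omega
  rw [if_neg h7]
  by_cases h8 : (520 : Int) > n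
  · rw [if_pos h8]; have u1 := H8.mp; have u2 := H7.mpr; omega
  rw [if_neg h8]
  by_cases h9 : (580 : Int) > n
  · rw [if_pos h9]; have u1 := H9.mp; have u2 := H8.mpr; omega
  rw [if_neg h9]
  by_cases h10 : (630 : Int) > n
  · rw [if_pos h10]; have u1 := H10.mp; have u2 := H9.mpr; omega
  rw [if_neg h10]
  by_cases h11 : (680 : Int) > n
  · rw [if_pos h11]; have u1 := H11.mp; have u2 := H10.mpr; omega
  rw [if_neg h11]
  by_cases h12 : (710 : Int) > n
  · rw [if_pos h12]; have u1 := H12.mp; have u2 := H11.mpr; omega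
  rw [if_neg h12]
  by_cases h13 : (740 : Int) > n
  · rw [if_pos h13]; have u1 := H13.mp; have u2 := H12.mpr; omega
  rw [if_neg h13]
  by_cases h14 : (760 : Int) > n
  · rw [if_pos h14]; have u1 := H14.mp; have u2 := H13.mpr; omega
  rw [if_neg h14]
  by_cases h15 : (780 : Int) > n
  · rw [if_pos h15]; have u1 := H15.mp; have u2 := H14.mpr; omega
  rw [if_neg h15]
  by_cases h16 : (800 : Int) > n
  · rw [if_pos h16]; have u1 := H16.mp; have u2 := H15.mpr; omega
  rw [if_neg h16]
  have u := H16.mpr; omega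

-- ===== VERDICT (by name: the statement is the Claim_ definition above) =====
theorem prefix_to_range_spec : Claim_equal_prefix_to_range := by
  intro s _
  unfold Spec_prefix_to_range
  simp only [prefix_to_range, prefix_to_range_alt]
  by_cases hE : PySem.Str.isIn "E" (PySem.Str.upper s) = true
  · rw [if_pos hE, if_pos hE]
  · rw [if_neg hE, if_neg hE]
    by_cases hV : PySem.Str.isIn "V" (PySem.Str.upper s) = true
    · rw [if_pos hV, if_pos hV]
    · rw [if_neg hV, if_neg hV]
      cases PySem.Int.ofStr? s with
      | none => rfl
      | some n => exact prefixLoop_eq_bisect n
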